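-- pv_equiv track=rewrite | github.com/Sergei-V-Fedorov/python-basic | Module18/09_message/main.py | reverse_on_punctuation
-- ===== SOURCE A (Python) =====
-- def reverse_on_punctuation(original_string):
--     copy_of_original = original_string[:] + '\0'  # для отслеживания конца строки
--     string_of_letters = []
--     result = []
--     for symbol in copy_of_original:
--         if symbol.isalpha():  # формируем слово
--             string_of_letters.append(symbol)  # добавляем в слово
--         elif not symbol.isalpha() or symbol == '\0':  # добавляем слово в резалт
--             reversed_word = ''.join(string_of_letters[::-1])  # переворачиваем слово,
--             result.append(reversed_word + symbol)  # добавляем в резалт вместе с пунктуацией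
--             string_of_letters = []
--     result = ''.join(result)
--     return result[:-1]   # без '\0'
-- ===== SOURCE B (Python) =====
-- def _run_starts(alpha):
--     # start[i] = index where the maximal equal-alpha run containing i begins
--     # (runs of alphabetic characters; every non-alphabetic position is its own start)
--     start = []
--     for i, a in enumerate(alpha):
--         start.append(start[i - 1] if i and a and alpha[i - 1] else i)
--     return start
--
--
-- def reverse_on_punctuation(original_string):
--     # Positional mirror: no buffer, no run materialisation, no reversal.
--     # For an alphabetic position i inside the run [start[i], end[i]], the output
--     # character is s[start[i] + end[i] - i]; non-alphabetic positions are copied.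
--     s = original_string
--     n = len(s)
--     alpha = [c.isalpha() for c in s]
--     start = _run_starts(alpha)
--     rstart = _run_starts(alpha[::-1])
--     end = [n - 1 - rstart[n - 1 - i] for i in range(n)]
--     return ''.join(s[start[i] + end[i] - i] if alpha[i] else s[i]
--                    for i in range(n))
-- ===== Notes on version B (the rewrite author's own statement) =====
-- stated objective: alternative
-- what changed: Replaced A's left-to-right state machine with a '\0' sentinel and a pending-word buffer by a positional-mirror algorithm: staged passes compute, for every position, the start and end index of its alphabetic run (the end indices via the same run-start helper applied to the reversed alpha mask), and the output character at an alphabetic position i is simply s[start[i]+end[i]-i]; no buffer, no run materialisation, no reversal.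
import Mathlib
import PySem

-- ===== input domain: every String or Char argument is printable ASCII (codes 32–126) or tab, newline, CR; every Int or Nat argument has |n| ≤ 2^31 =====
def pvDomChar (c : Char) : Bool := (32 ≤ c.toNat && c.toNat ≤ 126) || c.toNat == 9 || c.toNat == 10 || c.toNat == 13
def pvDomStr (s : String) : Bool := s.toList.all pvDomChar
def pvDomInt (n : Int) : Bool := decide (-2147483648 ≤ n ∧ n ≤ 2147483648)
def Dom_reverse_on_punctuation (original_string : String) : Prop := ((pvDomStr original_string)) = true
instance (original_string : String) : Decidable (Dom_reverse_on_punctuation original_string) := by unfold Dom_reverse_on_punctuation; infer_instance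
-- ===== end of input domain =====

-- B replaces A's forward state machine (pending-word buffer + '\0' sentinel) by a
-- positional-mirror algorithm: staged passes compute each position's run-start and
-- run-end index, and the output at an alphabetic position i is s[start[i]+end[i]-i];
-- objective: alternative (no buffer, no run materialisation, no reversal).


-- ===== PORT A =====
-- Transliteration of A: append the sentinel '\0', fold the per-character state machine
-- (string_of_letters, result : list of strings as List (List Char)), join, drop the last char
-- (result[:-1] on a string = dropLast; letters[::-1] = List.reverse — both exact here).
def reverse_on_punctuation (original_string : String) : String :=
  let copy_of_original := original_string.toList ++ ['\x00']
  let st := copy_of_original.foldl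
    (fun (acc : List Char × List (List Char)) symbol =>
      if PySem.Chars.isalpha symbol then (acc.1 ++ [symbol], acc.2)
      else ([], acc.2 ++ [acc.1.reverse ++ [symbol]]))
    ([], [])
  String.ofList st.2.flatten.dropLast

-- ===== PORT B =====
-- _run_starts of Source B: the Python guard 'i and a and alpha[i-1]' is carried as prevAlpha
-- (false at i = 0, so the 'i and' part is absorbed) and prevStart (= start[i-1], the
-- previously appended value); exact on every input.
def mkStarts (prevAlpha : Bool) (prevStart : Nat) (i : Nat) : List Bool → List Nat
  | [] => []
  | a :: rest =>
    let st := if prevAlpha && a then prevStart else i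
    st :: mkStarts a st (i + 1) rest

-- Transliteration of B. Every Python list/str index below is non-negative and in range
-- (established by the lemmas), so s[j] / list[j] is getD with an arbitrary default.
def reverse_on_punctuation_alt (original_string : String) : String :=
  let s := original_string.toList
  let n := s.length
  let alpha := s.map PySem.Chars.isalpha
  let start := mkStarts false 0 0 alpha
  let rstart := mkStarts false 0 0 alpha.reverse
  let endl := (List.range n).map (fun i => n - 1 - rstart.getD (n - 1 - i) 0)
  String.ofList ((List.range n).map (fun i =>
    if alpha.getD i false then s.getD (start.getD i 0 + endl.getD i 0 - i) ' '
    else s.getD i ' '))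

-- ===== PRECONDITION & SPEC =====
def Spec_reverse_on_punctuation (original_string : String) (out : String) : Prop := out = reverse_on_punctuation_alt original_string
instance (original_string : String) (out : String) : Decidable (Spec_reverse_on_punctuation original_string out) := by unfold Spec_reverse_on_punctuation; infer_instance

-- ===== CLAIM (what is proved, stated in full; the proofs are below) =====
def Claim_equal_reverse_on_punctuation : Prop := ∀ (original_string : String), Dom_reverse_on_punctuation original_string → Spec_reverse_on_punctuation original_string (reverse_on_punctuation original_string)

-- ===== LEMMAS AND PROOFS =====

-- Common reference point for both proofs: the string split into maximal alpha/non-alpha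
-- runs, alpha runs reversed.
def grpRuns (cs : List Char) : List Char :=
  match cs with
  | [] => []
  | c :: rest =>
    let k := PySem.Chars.isalpha c
    let run := c :: rest.takeWhile (fun d => PySem.Chars.isalpha d == k)
    let tl := rest.dropWhile (fun d => PySem.Chars.isalpha d == k)
    (if k then run.reverse else run) ++ grpRuns tl
termination_by cs.length
decreasing_by
  simpa using Nat.lt_succ_of_le (List.length_dropWhile_le _ _)

-- ---- A's side: state machine ⇒ grpRuns ----

-- A's state machine as a structural recursion emitting characters directly:
-- hh w cs = the characters A's loop appends to result while consuming cs from pending word w.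
def hh (w : List Char) : List Char → List Char
  | [] => []
  | c :: cs =>
    if PySem.Chars.isalpha c then hh (w ++ [c]) cs
    else (w.reverse ++ [c]) ++ hh [] cs

-- the same machine without the sentinel: the pending word is flushed at the end of input
def h (w : List Char) : List Char → List Char
  | [] => w.reverse
  | c :: cs =>
    if PySem.Chars.isalpha c then h (w ++ [c]) cs
    else w.reverse ++ (c :: h [] cs)

lemma foldl_flatten (l : List Char) : ∀ (w : List Char) (out : List (List Char)),
    (l.foldl (fun (acc : List Char × List (List Char)) symbol =>
      if PySem.Chars.isalpha symbol then (acc.1 ++ [symbol], acc.2)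
      else ([], acc.2 ++ [acc.1.reverse ++ [symbol]])) (w, out)).2.flatten
      = out.flatten ++ hh w l := by
  induction l with
  | nil => intro w out; simp [hh]
  | cons c cs ih =>
    intro w out
    by_cases hc : PySem.Chars.isalpha c
    · simp [List.foldl_cons, hc, hh, ih]
    · simp [List.foldl_cons, hc, hh, ih]

lemma hh_sentinel (l : List Char) : ∀ w, hh w (l ++ ['\x00']) = h w l ++ ['\x00'] := by
  induction l with
  | nil => intro w; simp [hh, h]; decide
  | cons c cs ih =>
    intro w
    by_cases hc : PySem.Chars.isalpha c
    · simp [hh, h, hc, ih]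
    · simp [hh, h, hc, ih]

-- groupby-style cons equations with the run predicate normalised to isalpha / !isalpha
lemma grpRuns_cons_alpha (c : Char) (cs : List Char) (hc : PySem.Chars.isalpha c = true) :
    grpRuns (c :: cs) = ((List.takeWhile (fun d => PySem.Chars.isalpha d) cs).reverse ++ [c])
      ++ grpRuns (List.dropWhile (fun d => PySem.Chars.isalpha d) cs) := by
  rw [grpRuns.eq_def]
  simp [hc]

lemma grpRuns_cons_nonalpha (c : Char) (cs : List Char) (hc : PySem.Chars.isalpha c = false) :
    grpRuns (c :: cs) = c :: (List.takeWhile (fun d => !PySem.Chars.isalpha d) cs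
      ++ grpRuns (List.dropWhile (fun d => !PySem.Chars.isalpha d) cs)) := by
  rw [grpRuns.eq_def]
  simp [hc]

-- core run lemma: the state machine from pending word w equals
-- "(w ++ leading alpha run) reversed, then the run-wise result of the rest"
lemma h_grp (n : ℕ) :
    (∀ xs w, xs.length ≤ n →
      h w xs = (w ++ xs.takeWhile (fun d => PySem.Chars.isalpha d)).reverse
        ++ grpRuns (xs.dropWhile (fun d => PySem.Chars.isalpha d)))
    ∧ (∀ cs, cs.length ≤ n →
        h [] cs = cs.takeWhile (fun d => !PySem.Chars.isalpha d)
          ++ grpRuns (cs.dropWhile (fun d => !PySem.Chars.isalpha d))) := by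
  induction n with
  | zero =>
    constructor
    · intro xs w hx
      have : xs = [] := List.length_eq_zero_iff.mp (Nat.le_zero.mp hx)
      subst this; simp [h, grpRuns]
    · intro cs hc
      have : cs = [] := List.length_eq_zero_iff.mp (Nat.le_zero.mp hc)
      subst this; simp [h, grpRuns]
  | succ n ih =>
    constructor
    · intro xs w hx
      match xs with
      | [] => simp [h, grpRuns]
      | c :: cs =>
        have hlen : cs.length ≤ n := by simp at hx; omega
        by_cases hc : PySem.Chars.isalpha c
        · simp only [h, List.takeWhile_cons, List.dropWhile_cons, hc, if_true]
          rw [ih.1 cs (w ++ [c]) hlen]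
          simp
        · simp [h, hc]
          rw [ih.2 cs hlen,
            grpRuns_cons_nonalpha c cs (eq_false_of_ne_true hc)]
    · intro cs hcl
      match cs with
      | [] => simp [h, grpRuns]
      | d :: ds =>
        have hlen : ds.length ≤ n := by simp at hcl; omega
        by_cases hd : PySem.Chars.isalpha d
        · simp [h, hd]
          rw [ih.1 ds [d] hlen, grpRuns_cons_alpha d ds hd]
          simp
        · simp [h, hd]
          rw [ih.2 ds hlen]

lemma h_eq_grpRuns (xs : List Char) : h [] xs = grpRuns xs := by
  match xs with
  | [] => simp [h, grpRuns]
  | c :: cs =>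
    by_cases hc : PySem.Chars.isalpha c
    · rw [(h_grp (c :: cs).length).1 (c :: cs) [] le_rfl, grpRuns_cons_alpha c cs hc]
      simp [hc]
    · rw [(h_grp (c :: cs).length).2 (c :: cs) le_rfl,
        grpRuns_cons_nonalpha c cs (eq_false_of_ne_true hc)]
      simp [hc]

-- ---- B's side: positional mirror ⇒ grpRuns ----

-- named components of B's pipeline (definitionally those of the port)
def startsOf (s : List Char) : List Nat := mkStarts false 0 0 (s.map PySem.Chars.isalpha)

def rstartsOf (s : List Char) : List Nat :=
  mkStarts false 0 0 (s.map PySem.Chars.isalpha).reverse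

def endsOf (s : List Char) : List Nat :=
  (List.range s.length).map (fun i => s.length - 1 - (rstartsOf s).getD (s.length - 1 - i) 0)

def outOf (s : List Char) : List Char :=
  (List.range s.length).map (fun i =>
    if (s.map PySem.Chars.isalpha).getD i false
    then s.getD ((startsOf s).getD i 0 + (endsOf s).getD i 0 - i) ' '
    else s.getD i ' ')

lemma alt_eq_outOf (s : String) :
    reverse_on_punctuation_alt s = String.ofList (outOf s.toList) := rfl

lemma mk_length (xs : List Bool) : ∀ b st i, (mkStarts b st i xs).length = xs.length := by
  induction xs with
  | nil => intro b st i; simp [mkStarts]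
  | cons a r ih => intro b st i; simp [mkStarts, ih]

-- with prevAlpha = false the carried prevStart is irrelevant
lemma mk_false_ps (xs : List Bool) (ps i : Nat) :
    mkStarts false ps i xs = mkStarts false 0 i xs := by
  cases xs <;> simp [mkStarts]

-- if the list does not start with true, the whole incoming state is irrelevant
lemma mk_false_state (xs : List Bool) (b : Bool) (st i : Nat)
    (hx : xs.head? ≠ some true) : mkStarts b st i xs = mkStarts false 0 i xs := by
  match xs with
  | [] => rfl
  | a :: r =>
    have ha : a = false := by
      cases a
      · rfl
      · exact absurd rfl hx
    subst ha
    simp [mkStarts]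

-- state threaded through a prefix
def stAfter (b : Bool) (st i : Nat) : List Bool → Bool × Nat
  | [] => (b, st)
  | a :: rest => stAfter a (if b && a then st else i) (i + 1) rest

lemma mk_append (A : List Bool) : ∀ (b : Bool) (st i : Nat) (B : List Bool),
    mkStarts b st i (A ++ B) =
      mkStarts b st i A ++
        mkStarts (stAfter b st i A).1 (stAfter b st i A).2 (i + A.length) B := by
  induction A with
  | nil => intro b st i B; simp [mkStarts, stAfter]
  | cons a r ih =>
    intro b st i B
    simp only [List.cons_append, mkStarts, stAfter]
    rw [ih]
    have : i + 1 + r.length = i + (a :: r).length := by simp; omega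
    rw [this]

lemma stAfter_fst (A : List Bool) : ∀ b st i, (stAfter b st i A).1 = A.getLast?.getD b := by
  induction A with
  | nil => intro b st i; simp [stAfter]
  | cons a r ih =>
    intro b st i
    show (stAfter a (if b && a then st else i) (i + 1) r).1 = _
    rw [ih]
    cases r with
    | nil => simp
    | cons x xs =>
      rw [List.getLast?_cons_cons]
      cases hgl : (x :: xs).getLast? with
      | none => simp at hgl
      | some y => simp

lemma stAfter_rep_fst (x : Bool) (k : Nat) (hk : 0 < k) (b : Bool) (st i : Nat) :
    (stAfter b st i (List.replicate k x)).1 = x := by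
  rw [stAfter_fst]
  match k, hk with
  | k + 1, _ => simp [List.getLast?_replicate]

lemma mk_true_rep (k : Nat) : ∀ st i, mkStarts true st i (List.replicate k true) = List.replicate k st := by
  induction k with
  | zero => intro st i; simp [mkStarts]
  | succ k ih => intro st i; simp [List.replicate_succ, mkStarts, ih]

lemma mk_rep_true (k : Nat) (ps i : Nat) (hk : 0 < k) :
    mkStarts false ps i (List.replicate k true) = List.replicate k i := by
  match k, hk with
  | k + 1, _ => simp [List.replicate_succ, mkStarts, mk_true_rep]

lemma mk_rep_false (k : Nat) : ∀ (b : Bool) (st i : Nat),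
    mkStarts b st i (List.replicate k false) = List.range' i k := by
  induction k with
  | zero => intro b st i; simp [mkStarts]
  | succ k ih => intro b st i; simp [List.replicate_succ, mkStarts, ih, List.range'_succ]

lemma mk_shift (xs : List Bool) : ∀ (b : Bool) (st i d : Nat),
    mkStarts b (st + d) (i + d) xs = (mkStarts b st i xs).map (· + d) := by
  induction xs with
  | nil => intro b st i d; simp [mkStarts]
  | cons a r ih =>
    intro b st i d
    cases hba : b && a
    · simp only [mkStarts, hba, Bool.false_eq_true, if_false, List.map_cons]
      rw [← Nat.add_right_comm i 1 d, ih]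
    · simp only [mkStarts, hba, if_true, List.map_cons]
      rw [← Nat.add_right_comm i 1 d, ih]

-- mkStarts from the neutral state at a shifted base index
lemma mk_false_shift (xs : List Bool) (k : Nat) :
    mkStarts false 0 k xs = (mkStarts false 0 0 xs).map (· + k) := by
  rw [← mk_false_ps xs k k]
  have := mk_shift xs false 0 0 k
  simpa using this

lemma mk_getD_le (xs : List Bool) : ∀ (b : Bool) (st i j : Nat), st ≤ i → j < xs.length →
    (mkStarts b st i xs).getD j 0 ≤ i + j := by
  induction xs with
  | nil => intro b st i j _ hj; simp at hj
  | cons a r ih =>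
    intro b st i j hst hj
    match j with
    | 0 =>
      simp only [mkStarts, List.getD_cons_zero]
      split <;> omega
    | j + 1 =>
      simp only [mkStarts, List.getD_cons_succ]
      have := ih a (if b && a then st else i) (i + 1) j
        (by split <;> omega) (by simpa using Nat.lt_of_succ_lt_succ hj)
      omega

-- run decomposition of mkStarts from the left …
lemma mk_decomp (key : Bool) (k : Nat) (hk : 0 < k) (T : List Bool) (hT : T.head? ≠ some key) :
    mkStarts false 0 0 (List.replicate k key ++ T)
      = (if key then List.replicate k 0 else List.range' 0 k)
        ++ (mkStarts false 0 0 T).map (· + k) := by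
  rw [mk_append]
  have hst1 : (stAfter false 0 0 (List.replicate k key)).1 = key := stAfter_rep_fst key k hk _ _ _
  have hidx : 0 + (List.replicate k key).length = k := by simp
  rw [hst1, hidx]
  have htail : mkStarts key (stAfter false 0 0 (List.replicate k key)).2 k T
      = (mkStarts false 0 0 T).map (· + k) := by
    cases hkv : key
    · rw [mk_false_ps, mk_false_shift]
    · rw [mk_false_state T true _ k (by rw [hkv] at hT; exact hT), mk_false_shift]
  rw [htail]
  cases hkv : key
  · rw [mk_rep_false]; simp
  · rw [mk_rep_true k 0 0 hk]; simp

-- … and from the right: an already-reduced reversed mask followed by a reversed run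
lemma mk_decomp_rev (key : Bool) (k : Nat) (hk : 0 < k) (T : List Bool) (hT : T.head? ≠ some key) :
    mkStarts false 0 0 (T.reverse ++ List.replicate k key)
      = mkStarts false 0 0 T.reverse
        ++ (if key then List.replicate k T.length else List.range' T.length k) := by
  rw [mk_append]
  congr 1
  have hidx : 0 + T.reverse.length = T.length := by simp
  rw [hidx]
  cases hkv : key
  · rw [mk_rep_false]; simp
  · have hb : (stAfter false 0 0 T.reverse).1 = false := by
      rw [stAfter_fst]
      match hTh : T with
      | [] => simp
      | x :: xs =>
        have hx : x = false := by
          cases x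
          · rfl
          · rw [hkv] at hT; simp at hT
        simp [List.getLast?_reverse, hx]
    rw [hb, mk_rep_true k _ _ hk]; simp

lemma getD_rep {α : Type} (k i : Nat) (x d : α) (hlt : i < k) :
    (List.replicate k x).getD i d = x := by
  rw [List.getD_eq_getElem _ _ (by simpa using hlt)]
  simp

lemma getD_map_range {α : Type} (n j : ℕ) (f : ℕ → α) (d : α) (hlt : j < n) :
    ((List.range n).map f).getD j d = f j := by
  rw [List.getD_eq_getElem _ _ (by simpa using hlt)]
  simp

lemma getD_map_add (l : List ℕ) (k j d : ℕ) (hlt : j < l.length) :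
    (l.map (· + k)).getD j d = l.getD j d + k := by
  rw [List.getD_eq_getElem _ _ (by simpa using hlt), List.getD_eq_getElem _ _ hlt]
  simp

lemma getD_rev (l : List Char) (i : ℕ) (d : Char) (hlt : i < l.length) :
    l.reverse.getD i d = l.getD (l.length - 1 - i) d := by
  rw [List.getD_eq_getElem _ _ (by simpa using hlt),
    List.getD_eq_getElem _ _ (by omega)]
  simp [List.getElem_reverse]

lemma map_getD_self (l : List Char) (d : Char) :
    (List.range l.length).map (fun i => l.getD i d) = l := by
  apply List.ext_getElem
  · simp
  · intro i h1 h2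
    simp only [List.getElem_map, List.getElem_range]
    exact List.getD_eq_getElem _ _ h2

lemma endsOf_getD (s : List Char) (j : Nat) (hlt : j < s.length) :
    (endsOf s).getD j 0 = s.length - 1 - (rstartsOf s).getD (s.length - 1 - j) 0 := by
  rw [endsOf, getD_map_range _ _ _ _ hlt]

lemma rstartsOf_length (s : List Char) : (rstartsOf s).length = s.length := by
  simp [rstartsOf, mk_length]

lemma startsOf_length (s : List Char) : (startsOf s).length = s.length := by
  simp [startsOf, mk_length]

lemma rstarts_getD_le (s : List Char) (j : Nat) (hlt : j < s.length) :
    (rstartsOf s).getD j 0 ≤ j := by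
  have := mk_getD_le (s.map PySem.Chars.isalpha).reverse false 0 0 j (le_refl 0)
    (by simpa using hlt)
  simpa [rstartsOf] using this

lemma starts_getD_le (s : List Char) (j : Nat) (hlt : j < s.length) :
    (startsOf s).getD j 0 ≤ j := by
  have := mk_getD_le (s.map PySem.Chars.isalpha) false 0 0 j (le_refl 0)
    (by simpa using hlt)
  simpa [startsOf] using this

lemma endsOf_getD_bounds (s : List Char) (j : Nat) (hlt : j < s.length) :
    j ≤ (endsOf s).getD j 0 ∧ (endsOf s).getD j 0 ≤ s.length - 1 := by
  rw [endsOf_getD _ _ hlt]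
  have h2 : s.length - 1 - j < s.length := by omega
  have := rstarts_getD_le s (s.length - 1 - j) h2
  omega

-- outOf on a maximal run followed by the rest
lemma outOf_decomp (r t : List Char) (key : Bool) (hk : 0 < r.length)
    (hmapr : r.map PySem.Chars.isalpha = List.replicate r.length key)
    (hthead : (t.map PySem.Chars.isalpha).head? ≠ some key) :
    outOf (r ++ t) = (if key then r.reverse else r) ++ outOf t := by
  have halpha : (r ++ t).map PySem.Chars.isalpha
      = List.replicate r.length key ++ t.map PySem.Chars.isalpha := by
    rw [List.map_append, hmapr]
  have hstarts : startsOf (r ++ t)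
      = (if key then List.replicate r.length 0 else List.range' 0 r.length)
        ++ (startsOf t).map (· + r.length) := by
    rw [startsOf, halpha, mk_decomp key r.length hk _ hthead, startsOf]
  have hR : rstartsOf (r ++ t)
      = rstartsOf t ++ (if key then List.replicate r.length t.length
                        else List.range' t.length r.length) := by
    rw [rstartsOf, halpha, List.reverse_append, List.reverse_replicate,
      mk_decomp_rev key r.length hk _ hthead, rstartsOf]
    simp
  have hlen : (r ++ t).length = r.length + t.length := by simp
  have hpre_len : (if key then List.replicate r.length 0
      else List.range' 0 r.length).length = r.length := by cases key <;> simp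
  -- elementwise facts on the run part
  have hrun : ∀ i, i < r.length →
      (if (( r ++ t).map PySem.Chars.isalpha).getD i false
       then (r ++ t).getD ((startsOf (r ++ t)).getD i 0 + (endsOf (r ++ t)).getD i 0 - i) ' '
       else (r ++ t).getD i ' ')
      = (if key then r.reverse else r).getD i ' ' := by
    intro i hi
    have ha : ((r ++ t).map PySem.Chars.isalpha).getD i false = key := by
      rw [halpha, List.getD_append _ _ _ _ (by simpa using hi), getD_rep _ _ _ _ hi]
    rw [ha]
    cases hkv : key
    · rw [if_neg Bool.false_ne_true, if_neg Bool.false_ne_true,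
        List.getD_append _ _ _ _ hi]
    · simp only [reduceIte]
      simp only [hkv, reduceIte] at hstarts hR
      have hst : (startsOf (r ++ t)).getD i 0 = 0 := by
        rw [hstarts, List.getD_append _ _ _ _ (by simpa using hi),
          getD_rep _ _ _ _ hi]
      have hrst : (rstartsOf (r ++ t)).getD ((r ++ t).length - 1 - i) 0 = t.length := by
        rw [hR, List.getD_append_right _ _ _ _ (by rw [rstartsOf_length]; omega)]
        rw [rstartsOf_length]
        rw [getD_rep _ _ _ _ (by omega)]
      have hend : (endsOf (r ++ t)).getD i 0 = r.length - 1 := by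
        rw [endsOf_getD _ _ (by omega), hrst]
        omega
      rw [hst, hend]
      have hidx : 0 + (r.length - 1) - i = r.length - 1 - i := by omega
      rw [hidx, List.getD_append _ _ _ _ (by omega), ← getD_rev r i ' ' hi]
  -- elementwise facts on the tail part
  have htail : ∀ j, j < t.length →
      (if ((r ++ t).map PySem.Chars.isalpha).getD (r.length + j) false
       then (r ++ t).getD ((startsOf (r ++ t)).getD (r.length + j) 0
              + (endsOf (r ++ t)).getD (r.length + j) 0 - (r.length + j)) ' '
       else (r ++ t).getD (r.length + j) ' ')
      = (if (t.map PySem.Chars.isalpha).getD j false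
         then t.getD ((startsOf t).getD j 0 + (endsOf t).getD j 0 - j) ' '
         else t.getD j ' ') := by
    intro j hj
    have ha : ((r ++ t).map PySem.Chars.isalpha).getD (r.length + j) false
        = (t.map PySem.Chars.isalpha).getD j false := by
      rw [halpha, List.getD_append_right _ _ _ _ (by simp)]
      simp
    rw [ha]
    by_cases hb : (t.map PySem.Chars.isalpha).getD j false
    · rw [if_pos hb, if_pos hb]
      have hst : (startsOf (r ++ t)).getD (r.length + j) 0 = (startsOf t).getD j 0 + r.length := by
        rw [hstarts, List.getD_append_right _ _ _ _ (by rw [hpre_len]; omega), hpre_len]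
        have : r.length + j - r.length = j := by omega
        rw [this, getD_map_add _ _ _ _ (by rw [startsOf_length]; exact hj)]
      have hv := rstarts_getD_le t (t.length - 1 - j) (by omega)
      have hrst : (rstartsOf (r ++ t)).getD ((r ++ t).length - 1 - (r.length + j)) 0
          = (rstartsOf t).getD (t.length - 1 - j) 0 := by
        have hidx : (r ++ t).length - 1 - (r.length + j) = t.length - 1 - j := by
          rw [hlen]; omega
        rw [hidx, hR, List.getD_append _ _ _ _ (by rw [rstartsOf_length]; omega)]
      have hend : (endsOf (r ++ t)).getD (r.length + j) 0 = r.length + (endsOf t).getD j 0 := by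
        rw [endsOf_getD _ _ (by rw [hlen]; omega), hrst, endsOf_getD t j hj, hlen]
        omega
      have hbounds := endsOf_getD_bounds t j hj
      have hstle := starts_getD_le t j hj
      rw [hst, hend]
      have hidx2 : (startsOf t).getD j 0 + r.length + (r.length + (endsOf t).getD j 0)
          - (r.length + j) = r.length + ((startsOf t).getD j 0 + (endsOf t).getD j 0 - j) := by
        omega
      rw [hidx2, List.getD_append_right _ _ _ _ (by omega)]
      have : r.length + ((startsOf t).getD j 0 + (endsOf t).getD j 0 - j) - r.length
          = (startsOf t).getD j 0 + (endsOf t).getD j 0 - j := by omega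
      rw [this]
    · rw [if_neg hb, if_neg hb, List.getD_append_right _ _ _ _ (by omega)]
      have : r.length + j - r.length = j := by omega
      rw [this]
  -- assemble
  rw [outOf, outOf, hlen, List.range_add, List.map_append, List.map_map]
  congr 1
  · have hcongr := List.map_congr_left (fun i hi =>
      hrun i (List.mem_range.mp hi))
    rw [hcongr]
    cases hkv : key
    · simpa using map_getD_self r ' '
    · have : r.length = r.reverse.length := by simp
      rw [this]
      simpa using map_getD_self r.reverse ' '
  · exact List.map_congr_left (fun j hj => htail j (List.mem_range.mp hj))

-- the per-run characterisation: outOf equals grpRuns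
lemma outOf_eq_grpRuns (N : ℕ) : ∀ s : List Char, s.length ≤ N → outOf s = grpRuns s := by
  induction N with
  | zero =>
    intro s hs
    have : s = [] := List.length_eq_zero_iff.mp (Nat.le_zero.mp hs)
    subst this
    simp [outOf, grpRuns]
  | succ N ih =>
    intro s hs
    match s with
    | [] => simp [outOf, grpRuns]
    | c :: cs' =>
      have hr_cons : (c :: cs').takeWhile (fun d => PySem.Chars.isalpha d == PySem.Chars.isalpha c)
          = c :: cs'.takeWhile (fun d => PySem.Chars.isalpha d == PySem.Chars.isalpha c) := by
        simp
      have ht_eq : (c :: cs').dropWhile (fun d => PySem.Chars.isalpha d == PySem.Chars.isalpha c)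
          = cs'.dropWhile (fun d => PySem.Chars.isalpha d == PySem.Chars.isalpha c) := by
        simp
      have hrt : (c :: cs').takeWhile (fun d => PySem.Chars.isalpha d == PySem.Chars.isalpha c)
          ++ (c :: cs').dropWhile (fun d => PySem.Chars.isalpha d == PySem.Chars.isalpha c)
          = c :: cs' := List.takeWhile_append_dropWhile
      have hk : 0 < ((c :: cs').takeWhile
          (fun d => PySem.Chars.isalpha d == PySem.Chars.isalpha c)).length := by
        rw [hr_cons]; simp
      have hmapr : ((c :: cs').takeWhile
            (fun d => PySem.Chars.isalpha d == PySem.Chars.isalpha c)).map PySem.Chars.isalpha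
          = List.replicate ((c :: cs').takeWhile
              (fun d => PySem.Chars.isalpha d == PySem.Chars.isalpha c)).length
              (PySem.Chars.isalpha c) := by
        have h0 : ∀ b ∈ ((c :: cs').takeWhile
            (fun d => PySem.Chars.isalpha d == PySem.Chars.isalpha c)).map PySem.Chars.isalpha,
            b = PySem.Chars.isalpha c := by
          intro b hb
          obtain ⟨d, hd, rfl⟩ := List.mem_map.mp hb
          have := List.mem_takeWhile_imp hd
          simpa using this
        have := List.eq_replicate_of_mem h0
        simpa using this
      have hthead : (((c :: cs').dropWhile
            (fun d => PySem.Chars.isalpha d == PySem.Chars.isalpha c)).map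
            PySem.Chars.isalpha).head? ≠ some (PySem.Chars.isalpha c) := by
        cases htt : (c :: cs').dropWhile
            (fun d => PySem.Chars.isalpha d == PySem.Chars.isalpha c) with
        | nil => simp
        | cons x xs =>
          have hne := List.head_dropWhile_not
            (fun d => PySem.Chars.isalpha d == PySem.Chars.isalpha c) (l := c :: cs')
            (by rw [htt]; simp)
          have hne' : PySem.Chars.isalpha x ≠ PySem.Chars.isalpha c := by
            simpa [htt] using hne
          simpa using hne'
      have hlent : ((c :: cs').dropWhile
          (fun d => PySem.Chars.isalpha d == PySem.Chars.isalpha c)).length ≤ N := by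
        rw [ht_eq]
        have h1 := List.length_dropWhile_le
          (fun d => PySem.Chars.isalpha d == PySem.Chars.isalpha c) cs'
        have h2 : (c :: cs').length ≤ N + 1 := hs
        simp at h2
        omega
      have hgrp : grpRuns (c :: cs')
          = (if PySem.Chars.isalpha c
             then ((c :: cs').takeWhile
               (fun d => PySem.Chars.isalpha d == PySem.Chars.isalpha c)).reverse
             else (c :: cs').takeWhile
               (fun d => PySem.Chars.isalpha d == PySem.Chars.isalpha c))
            ++ grpRuns ((c :: cs').dropWhile
               (fun d => PySem.Chars.isalpha d == PySem.Chars.isalpha c)) := by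
        rw [grpRuns.eq_def]
        dsimp only
        rw [← hr_cons, ← ht_eq]
      calc outOf (c :: cs')
          = outOf ((c :: cs').takeWhile (fun d => PySem.Chars.isalpha d == PySem.Chars.isalpha c)
              ++ (c :: cs').dropWhile (fun d => PySem.Chars.isalpha d == PySem.Chars.isalpha c)) := by
            rw [hrt]
        _ = (if PySem.Chars.isalpha c
             then ((c :: cs').takeWhile
               (fun d => PySem.Chars.isalpha d == PySem.Chars.isalpha c)).reverse
             else (c :: cs').takeWhile
               (fun d => PySem.Chars.isalpha d == PySem.Chars.isalpha c))
            ++ outOf ((c :: cs').dropWhile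
               (fun d => PySem.Chars.isalpha d == PySem.Chars.isalpha c)) :=
            outOf_decomp _ _ _ hk hmapr hthead
        _ = (if PySem.Chars.isalpha c
             then ((c :: cs').takeWhile
               (fun d => PySem.Chars.isalpha d == PySem.Chars.isalpha c)).reverse
             else (c :: cs').takeWhile
               (fun d => PySem.Chars.isalpha d == PySem.Chars.isalpha c))
            ++ grpRuns ((c :: cs').dropWhile
               (fun d => PySem.Chars.isalpha d == PySem.Chars.isalpha c)) := by
            rw [ih _ hlent]
        _ = grpRuns (c :: cs') := hgrp.symm

-- ===== VERDICT (by name: the statement is the Claim_ definition above) =====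
theorem reverse_on_punctuation_spec : Claim_equal_reverse_on_punctuation := by
  intro s _
  show _ = _
  rw [alt_eq_outOf, outOf_eq_grpRuns s.toList.length s.toList le_rfl]
  dsimp only [reverse_on_punctuation]
  rw [foldl_flatten, hh_sentinel, h_eq_grpRuns]
  simp
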